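-- pv_equiv track=rewrite | github.com/wolfuardian/project-organizer-agentic | domain/services/fuzzy_match.py | fuzzy_score_positions
-- ===== SOURCE A (Python) =====
-- def fuzzy_score_positions(pattern: str, text: str) -> tuple[int, list[int]]:
--     """
--     與 fuzzy_score 相同的演算法，但額外回傳匹配字元的索引位置。
--     回傳 (score, positions)；若不匹配回傳 (-1, [])。
--     """
--     if not pattern:
--         return (0, [])
--
--     p = pattern.lower()
--     t = text.lower()
--
--     if t == p:
--         return (100 + len(p), list(range(len(p))))
--
--     pi = 0
--     score = 0
--     consecutive = 0
--     prev_ti = -1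
--     positions: list[int] = []
--
--     for ti, ch in enumerate(t):
--         if pi >= len(p):
--             break
--         if ch == p[pi]:
--             if ti == prev_ti + 1:
--                 consecutive += 1
--             else:
--                 consecutive = 1
--             score += 5 * consecutive
--
--             if ti == 0 or t[ti - 1] in "._-/ \\":
--                 score += 3
--
--             score += 1
--             prev_ti = ti
--             positions.append(ti)
--             pi += 1
--
--     if pi < len(p):
--         return (-1, [])
--
--     return (score, positions)
-- ===== SOURCE B (Python) =====
-- def fuzzy_score_positions(pattern: str, text: str) -> tuple[int, list[int]]:
--     if not pattern:
--         return (0, [])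
--     p = pattern.lower()
--     t = text.lower()
--     if t == p:
--         return (100 + len(p), list(range(len(p))))
--
--     # Pattern-driven matching: jump to each next character with str.find
--     # instead of scanning the text character by character.
--     positions = []
--     start = 0
--     for ch in p:
--         i = t.find(ch, start)
--         if i == -1:
--             return (-1, [])
--         positions.append(i)
--         start = i + 1
--
--     # Closed-form scoring per maximal run of consecutive indices:
--     # a run of length L contributes 5*(1+2+...+L) + L = 5*L*(L+1)//2 + L.
--     score = 0
--     rest = positions
--     while rest:
--         L = _run_len(rest[0], rest[1:]) + 1
--         score += 5 * L * (L + 1) // 2 + L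
--         rest = rest[L:]
--
--     # Word-boundary bonus, independent of runs.
--     score += sum(3 for pos in positions if pos == 0 or t[pos - 1] in "._-/ \\")
--     return (score, positions)
--
--
-- def _run_len(prev: int, rest: list[int]) -> int:
--     n = 0
--     for pos in rest:
--         if pos != prev + 1:
--             break
--         n += 1
--         prev = pos
--     return n
-- ===== Notes on version B (the rewrite author's own statement) =====
-- stated objective: alternative
-- what changed: B drives the match from the pattern (str.find jumps to each next character instead of A's character-by-character scan of the text) and replaces A's incremental consecutive-multiplier scoring by a closed-form score 5*L*(L+1)//2+L per maximal run of consecutive matched indices, with the word-boundary bonus summed in a separate pass.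
import Mathlib
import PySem

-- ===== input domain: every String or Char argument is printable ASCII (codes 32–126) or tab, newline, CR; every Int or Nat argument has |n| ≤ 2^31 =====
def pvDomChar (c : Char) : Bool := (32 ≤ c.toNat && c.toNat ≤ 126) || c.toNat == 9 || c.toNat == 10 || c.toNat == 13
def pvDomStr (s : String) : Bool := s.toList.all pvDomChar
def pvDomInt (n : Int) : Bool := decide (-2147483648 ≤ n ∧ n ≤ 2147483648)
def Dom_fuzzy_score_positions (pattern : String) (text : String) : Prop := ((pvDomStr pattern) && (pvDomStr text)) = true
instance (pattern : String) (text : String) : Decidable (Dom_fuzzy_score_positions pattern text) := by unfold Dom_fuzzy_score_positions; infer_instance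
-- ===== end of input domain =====

-- B replaces A's fused text scan by a pattern-driven matcher (str.find jumps to each next
-- character) and scores each maximal run of consecutive indices with a closed form; the
-- boundary bonus is summed separately. Same return value, proved equal on all inputs.

-- ===== PORT A =====
-- boundary characters "._-/ \\"
def pvBoundary : List Char := ['.', '_', '-', '/', ' ', '\\']

-- the for-loop of A: state (ti, pi, score, consecutive, prev_ti, positions); the post-loop
-- `if pi < len(p)` check is performed at loop exit (break or end of text)
def pvAGo (p t : List Char) : List Char → Int → Nat → Int → Int → Int → List Int → Int × List Int
  | [], _, pi, score, _, _, positions =>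
      if pi < p.length then (-1, []) else (score, positions)
  | ch :: rest, ti, pi, score, consecutive, prev_ti, positions =>
      if pi ≥ p.length then
        if pi < p.length then (-1, []) else (score, positions)
      else if p[pi]? = some ch then
        let consecutive' := if ti = prev_ti + 1 then consecutive + 1 else 1
        let score1 := score + 5 * consecutive'
        let score2 := if ti = 0 ∨ (∃ c, PySem.List.pyGet? t (ti - 1) = some c ∧ c ∈ pvBoundary)
                      then score1 + 3 else score1
        let score3 := score2 + 1
        pvAGo p t rest (ti + 1) (pi + 1) score3 consecutive' ti (positions ++ [ti])
      else
        pvAGo p t rest (ti + 1) pi score consecutive prev_ti positions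

def fuzzy_score_positions (pattern : String) (text : String) : Int × List Int :=
  if pattern.toList = [] then (0, [])
  else
    let p := PySem.Chars.lower pattern.toList
    let t := PySem.Chars.lower text.toList
    if t = p then (100 + (p.length : Int), (List.range p.length).map (fun i => (i : Int)))
    else pvAGo p t t 0 0 0 0 (-1) []

-- ===== PORT B =====
-- the `for ch in p` loop of B: `t.find(ch, start)` is PySem.Chars.findFrom; early return (-1, []) = none
def pvBMatch (t : List Char) : List Char → Int → List Int → Option (List Int)
  | [], _, acc => some acc
  | ch :: ps, start, acc =>
      let i := PySem.Chars.findFrom t [ch] start none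
      if i = -1 then none
      else pvBMatch t ps (i + 1) (acc ++ [i])

-- B's helper _run_len: count the leading chain pos = prev+1, pos+1, … (for-loop with break)
def pvRunLen : Int → List Int → Nat
  | _, [] => 0
  | prev, pos :: rest => if pos = prev + 1 then pvRunLen pos rest + 1 else 0

-- B's `while rest:` scoring loop: L = _run_len(rest[0], rest[1:]) + 1, closed-form run score,
-- rest = rest[L:]
def pvRunScore : List Int → Int
  | [] => 0
  | pos :: rest =>
      let k := pvRunLen pos rest
      let L : Int := (k : Int) + 1
      PySem.Int.floordiv (5 * L * (L + 1)) 2 + L + pvRunScore (rest.drop k)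
  termination_by l => l.length
  decreasing_by simp [List.length_drop]

-- B's bonus sum: sum(3 for pos in positions if pos == 0 or t[pos-1] in "._-/ \\")
def pvBonus (t : List Char) : List Int → Int
  | [] => 0
  | pos :: rest =>
      (if pos = 0 ∨ (∃ c, PySem.List.pyGet? t (pos - 1) = some c ∧ c ∈ pvBoundary)
       then (3 : Int) else 0) + pvBonus t rest

def fuzzy_score_positions_alt (pattern : String) (text : String) : Int × List Int :=
  if pattern.toList = [] then (0, [])
  else
    let p := PySem.Chars.lower pattern.toList
    let t := PySem.Chars.lower text.toList
    if t = p then (100 + (p.length : Int), (List.range p.length).map (fun i => (i : Int)))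
    else
      match pvBMatch t p 0 [] with
      | none => (-1, [])
      | some positions => (pvRunScore positions + pvBonus t positions, positions)

-- ===== PRECONDITION & SPEC =====
def Spec_fuzzy_score_positions (pattern : String) (text : String) (out : Int × List Int) : Prop := out = fuzzy_score_positions_alt pattern text
instance (pattern : String) (text : String) (out : Int × List Int) : Decidable (Spec_fuzzy_score_positions pattern text out) := by unfold Spec_fuzzy_score_positions; infer_instance

-- ===== CLAIM (what is proved, stated in full; the proofs are below) =====
def Claim_equal_fuzzy_score_positions : Prop := ∀ (pattern : String) (text : String), Dom_fuzzy_score_positions pattern text → Spec_fuzzy_score_positions pattern text (fuzzy_score_positions pattern text)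

-- ===== LEMMAS AND PROOFS =====

-- proof-side reference greedy matcher: gm pattern textSuffix index = the matched positions
def gm : List Char → List Char → Int → Option (List Int)
  | [], _, _ => some []
  | _ :: _, [], _ => none
  | pc :: ps, c :: cs, i =>
      if c = pc then (gm ps cs (i + 1)).map (fun l => i :: l)
      else gm (pc :: ps) cs (i + 1)
  termination_by _ l => l.length

-- proof-side image of A's loop: matching only, collecting indices (state ti, pi, acc)
def pvCollect (p : List Char) : List Char → Int → Nat → List Int → Nat × List Int
  | [], _, pi, acc => (pi, acc)
  | ch :: rest, ti, pi, acc =>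
      if pi = p.length then (pi, acc)
      else if p[pi]? = some ch then pvCollect p rest (ti + 1) (pi + 1) (acc ++ [ti])
      else pvCollect p rest (ti + 1) pi acc

-- proof-side image of A's scoring, incremental over the positions list
def pvIncScore (t : List Char) : List Int → Int → Int → Int → Int
  | [], score, _, _ => score
  | pos :: rest, score, consecutive, prev =>
      let consecutive' := if pos = prev + 1 then consecutive + 1 else 1
      let bonus := if pos = 0 ∨ (∃ c, PySem.List.pyGet? t (pos - 1) = some c ∧ c ∈ pvBoundary)
                   then (3 : Int) else 0
      pvIncScore t rest (score + 5 * consecutive' + 1 + bonus) consecutive' pos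

-- run part of the incremental score, bonus stripped
def pvH : Int → Int → List Int → Int
  | _, _, [] => 0
  | c, prev, pos :: rest =>
      let c' := if pos = prev + 1 then c + 1 else 1
      5 * c' + 1 + pvH c' pos rest

-- first index of ch, recursively (= Chars.find l [ch])
def pvFx (ch : Char) : List Char → Int
  | [] => -1
  | c :: cs => if c = ch then 0 else (if pvFx ch cs = -1 then -1 else pvFx ch cs + 1)

theorem pvCollect_acc (p : List Char) : ∀ (chars : List Char) (ti : Int) (pi : Nat) (acc : List Int),
    pvCollect p chars ti pi acc =
      ((pvCollect p chars ti pi []).1, acc ++ (pvCollect p chars ti pi []).2) := by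
  intro chars
  induction chars with
  | nil => intro ti pi acc; simp [pvCollect]
  | cons ch rest ih =>
      intro ti pi acc
      simp only [pvCollect]
      split
      · simp
      · split
        · rw [ih _ _ ([] ++ [ti]), ih _ _ (acc ++ [ti])]; simp
        · exact ih _ _ acc

-- the fused loop of A equals matching followed by incremental scoring
theorem pvAGo_eq (p t : List Char) : ∀ (chars : List Char) (ti : Int) (pi : Nat)
    (score consecutive prev_ti : Int) (positions : List Int), pi ≤ p.length →
    pvAGo p t chars ti pi score consecutive prev_ti positions =
      (if (pvCollect p chars ti pi []).1 < p.length then (-1, [])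
       else (pvIncScore t (pvCollect p chars ti pi []).2 score consecutive prev_ti,
             positions ++ (pvCollect p chars ti pi []).2)) := by
  intro chars
  induction chars with
  | nil =>
      intro ti pi score consecutive prev_ti positions _
      simp only [pvAGo, pvCollect]
      split <;> simp [pvIncScore]
  | cons ch rest ih =>
      intro ti pi score consecutive prev_ti positions hle
      simp only [pvAGo, pvCollect]
      by_cases hfull : pi = p.length
      · have hnl : ¬ pi < p.length := by omega
        simp [hfull, pvIncScore]
      · have hlt : pi < p.length := by omega
        have hge : ¬ pi ≥ p.length := by omega
        simp only [hge, if_false, if_neg hfull]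
        by_cases hm : p[pi]? = some ch
        · simp only [hm, if_true, List.nil_append]
          rw [ih _ _ _ _ _ _ (by omega), pvCollect_acc p rest (ti + 1) (pi + 1) [ti]]
          simp only [List.singleton_append, List.append_assoc, pvIncScore]
          split
          · rfl
          · split_ifs <;> ring_nf
        · simp only [hm, if_false]
          exact ih _ _ _ _ _ _ hle

-- A's matching pass agrees with the reference matcher gm
theorem pvCollect_gm (p : List Char) : ∀ (chars : List Char) (ti : Int) (pi : Nat) (acc : List Int),
    pi ≤ p.length →
    (∀ l, gm (p.drop pi) chars ti = some l → pvCollect p chars ti pi acc = (p.length, acc ++ l)) ∧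
    (gm (p.drop pi) chars ti = none → (pvCollect p chars ti pi acc).1 < p.length) := by
  intro chars
  induction chars with
  | nil =>
      intro ti pi acc hle
      constructor
      · intro l hl
        cases hdp : p.drop pi with
        | nil =>
            rw [hdp] at hl
            simp only [gm, Option.some.injEq] at hl
            have hpi : pi = p.length := by
              have := List.drop_eq_nil_iff.mp hdp; omega
            simp [pvCollect, hpi, ← hl]
        | cons a as => rw [hdp] at hl; simp [gm] at hl
      · intro hn
        cases hdp : p.drop pi with
        | nil => rw [hdp] at hn; simp [gm] at hn
        | cons a as =>
            have hlen := congrArg List.length hdp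
            simp [List.length_drop] at hlen
            simp only [pvCollect]
            omega
  | cons ch rest ih =>
      intro ti pi acc hle
      by_cases hfull : pi = p.length
      · have hdp : p.drop pi = [] := List.drop_eq_nil_iff.mpr (by omega)
        constructor
        · intro l hl
          rw [hdp] at hl
          simp only [gm, Option.some.injEq] at hl
          simp [pvCollect, hfull, ← hl]
        · intro hn; rw [hdp] at hn; simp [gm] at hn
      · have hlt : pi < p.length := by omega
        have hdp : p.drop pi = p[pi] :: p.drop (pi + 1) := List.drop_eq_getElem_cons hlt
        by_cases hm : p[pi] = ch
        · have hget : p[pi]? = some ch := by rw [List.getElem?_eq_getElem hlt, hm]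
          have hstepc : pvCollect p (ch :: rest) ti pi acc
              = pvCollect p rest (ti + 1) (pi + 1) (acc ++ [ti]) := by
            simp [pvCollect, hfull, hget]
          constructor
          · intro l hl
            rw [hdp] at hl
            simp only [gm, if_pos hm.symm] at hl
            cases hg : gm (p.drop (pi + 1)) rest (ti + 1) with
            | none => rw [hg] at hl; simp at hl
            | some l' =>
                rw [hg] at hl
                simp only [Option.map_some, Option.some.injEq] at hl
                have hrec := (ih (ti + 1) (pi + 1) (acc ++ [ti]) (by omega)).1 l' hg
                rw [hstepc, hrec, ← hl]
                simp
          · intro hn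
            rw [hdp] at hn
            simp only [gm, if_pos hm.symm] at hn
            cases hg : gm (p.drop (pi + 1)) rest (ti + 1) with
            | none =>
                have hrec := (ih (ti + 1) (pi + 1) (acc ++ [ti]) (by omega)).2 hg
                rw [hstepc]
                exact hrec
            | some l' => rw [hg] at hn; simp at hn
        · have hget : ¬ p[pi]? = some ch := by
            rw [List.getElem?_eq_getElem hlt]; simp [hm]
          have hgm : gm (p.drop pi) (ch :: rest) ti = gm (p.drop pi) rest (ti + 1) := by
            rw [hdp]; simp only [gm, if_neg (fun h : ch = p[pi] => hm h.symm)]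
          constructor
          · intro l hl
            rw [hgm] at hl
            have := (ih (ti + 1) pi acc hle).1 l hl
            simp only [pvCollect, if_neg hfull, if_neg hget]
            exact this
          · intro hn
            rw [hgm] at hn
            have := (ih (ti + 1) pi acc hle).2 hn
            simp only [pvCollect, if_neg hfull, if_neg hget]
            exact this

-- pvFx is nonnegative or the sentinel -1
theorem pvFx_cases (ch : Char) : ∀ l, pvFx ch l = -1 ∨ 0 ≤ pvFx ch l := by
  intro l
  induction l with
  | nil => left; rfl
  | cons c cs ih =>
      simp only [pvFx]
      split_ifs with h1 h2
      · right; omega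
      · left; rfl
      · right; rcases ih with h | h
        · exact absurd h h2
        · omega

-- find on a single-character needle computes pvFx
theorem pvFind_single (ch : Char) : ∀ (l : List Char), PySem.Chars.find l [ch] = pvFx ch l := by
  intro l
  induction l with
  | nil =>
      have h : ¬ ([ch] <:+: ([] : List Char)) := by simp
      simpa [pvFx] using (PySem.Chars.find_eq_neg_one_iff [] [ch]).mpr h
  | cons c cs ih =>
      by_cases hc : c = ch
      · subst hc
        have hinf : [c] <:+: (c :: cs) := (List.singleton_infix_iff c _).mpr (by simp)
        have hnn : 0 ≤ PySem.Chars.find (c :: cs) [c] :=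
          (PySem.Chars.find_nonneg_iff _ _).mpr hinf
        obtain ⟨hpre, hmin⟩ := PySem.Chars.find_spec hnn
        have h0 : (PySem.Chars.find (c :: cs) [c]).toNat = 0 := by
          by_contra h
          exact hmin 0 (by omega) (by simp [List.cons_prefix_iff])
        have hfx0 : pvFx c (c :: cs) = 0 := by simp [pvFx]
        rw [hfx0]
        omega
      · by_cases hmem : ch ∈ cs
        · have hinfcs : [ch] <:+: cs := (List.singleton_infix_iff ch cs).mpr hmem
          have hnncs : 0 ≤ PySem.Chars.find cs [ch] :=
            (PySem.Chars.find_nonneg_iff _ _).mpr hinfcs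
          obtain ⟨hprecs, hmincs⟩ := PySem.Chars.find_spec hnncs
          have hinf : [ch] <:+: (c :: cs) := (List.singleton_infix_iff ch _).mpr (by simp [hmem])
          have hnn : 0 ≤ PySem.Chars.find (c :: cs) [ch] :=
            (PySem.Chars.find_nonneg_iff _ _).mpr hinf
          obtain ⟨hpre, hmin⟩ := PySem.Chars.find_spec hnn
          have hf0 : (PySem.Chars.find (c :: cs) [ch]).toNat ≠ 0 := by
            intro h
            rw [h] at hpre
            simp only [List.drop_zero, List.cons_prefix_iff] at hpre
            obtain ⟨l', hl', -⟩ := hpre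
            injection hl' with h1 h2
            exact hc h1
          have h1 : (PySem.Chars.find (c :: cs) [ch]).toNat ≤ (PySem.Chars.find cs [ch]).toNat + 1 := by
            by_contra h
            exact hmin ((PySem.Chars.find cs [ch]).toNat + 1) (by omega)
              (by simpa [List.drop_succ_cons] using hprecs)
          have h2 : (PySem.Chars.find cs [ch]).toNat ≤ (PySem.Chars.find (c :: cs) [ch]).toNat - 1 := by
            by_contra h
            apply hmincs ((PySem.Chars.find (c :: cs) [ch]).toNat - 1) (by omega)
            obtain ⟨m, hm2⟩ : ∃ m, (PySem.Chars.find (c :: cs) [ch]).toNat = m + 1 :=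
              ⟨(PySem.Chars.find (c :: cs) [ch]).toNat - 1, by omega⟩
            rw [hm2, List.drop_succ_cons] at hpre
            have hm3 : (PySem.Chars.find (c :: cs) [ch]).toNat - 1 = m := by omega
            rw [hm3]
            exact hpre
          have hfx : pvFx ch cs = PySem.Chars.find cs [ch] := ih.symm
          simp only [pvFx, if_neg hc]
          rw [← hfx] at hnncs
          rw [if_neg (by omega), ← ih]
          omega
        · have h1 : PySem.Chars.find cs [ch] = -1 :=
            (PySem.Chars.find_eq_neg_one_iff _ _).mpr
              (fun h => hmem ((List.singleton_infix_iff ch cs).mp h))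
          have h2 : PySem.Chars.find (c :: cs) [ch] = -1 :=
            (PySem.Chars.find_eq_neg_one_iff _ _).mpr
              (fun h => by
                have := (List.singleton_infix_iff ch _).mp h
                simp only [List.mem_cons] at this
                rcases this with h | h
                · exact hc h.symm
                · exact hmem h)
          simp [pvFx, hc, ← ih, h1, h2]

-- B's find-driven matching loop agrees with the reference matcher gm
theorem pvBMatch_gm (t : List Char) : ∀ (l : List Char) (s : Nat) (ps : List Char) (acc : List Int),
    s ≤ t.length → t.drop s = l →
    pvBMatch t ps (s : Int) acc = (gm ps l (s : Int)).map (fun xs => acc ++ xs) := by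
  intro l
  induction l with
  | nil =>
      intro s ps acc hs hdrop
      cases ps with
      | nil => simp [pvBMatch, gm]
      | cons ch ps' =>
          have hfind : PySem.Chars.find (t.drop s) [ch] = -1 := by
            rw [hdrop, pvFind_single]; rfl
          have hff : PySem.Chars.findFrom t [ch] (s : Int) none = -1 := by
            rw [PySem.Chars.findFrom_natCast t [ch] s hs, hfind]; simp
          simp [pvBMatch, gm, hff]
  | cons c cs ih =>
      intro s ps acc hs hdrop
      have hslt : s < t.length := by
        by_contra h
        have h2 := List.drop_eq_nil_iff.mpr (by omega : t.length ≤ s)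
        rw [hdrop] at h2; simp at h2
      have hdrop1 : t.drop (s + 1) = cs := by
        rw [← List.tail_drop, hdrop]; rfl
      cases ps with
      | nil => simp [pvBMatch, gm]
      | cons ch ps' =>
          by_cases hc : c = ch
          · subst hc
            have hfind : PySem.Chars.find (t.drop s) [c] = 0 := by
              rw [hdrop, pvFind_single]; simp [pvFx]
            have hff : PySem.Chars.findFrom t [c] (s : Int) none = (s : Int) := by
              rw [PySem.Chars.findFrom_natCast t [c] s hs, hfind]; simp
            have hcast : (s : Int) + 1 = ((s + 1 : Nat) : Int) := by push_cast; ring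
            simp only [pvBMatch, hff]
            rw [if_neg (by omega : ¬ (s : Int) = -1), hcast,
              ih (s + 1) ps' (acc ++ [(s : Int)]) (by omega) hdrop1]
            simp only [gm]
            rw [hcast]
            simp [Function.comp_def]
          · have hfshift : PySem.Chars.findFrom t [ch] (s : Int) none
                = PySem.Chars.findFrom t [ch] ((s + 1 : Nat) : Int) none := by
              rw [PySem.Chars.findFrom_natCast t [ch] s hs,
                PySem.Chars.findFrom_natCast t [ch] (s + 1) (by omega),
                hdrop, hdrop1, pvFind_single, pvFind_single]
              simp only [pvFx, if_neg hc]
              by_cases h0 : pvFx ch cs = -1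
              · simp [h0]
              · have h1 : ¬ pvFx ch cs + 1 = -1 := by
                  rcases pvFx_cases ch cs with h | h
                  · exact absurd h h0
                  · omega
                simp only [if_neg h0, if_neg h1]
                push_cast; ring
            have hstep : pvBMatch t (ch :: ps') (s : Int) acc
                = pvBMatch t (ch :: ps') ((s + 1 : Nat) : Int) acc := by
              simp only [pvBMatch]; rw [hfshift]
            rw [hstep, ih (s + 1) (ch :: ps') acc (by omega) hdrop1]
            simp only [gm, if_neg hc]
            rw [show ((s + 1 : Nat) : Int) = (s : Int) + 1 by push_cast; ring]

-- incremental scoring splits into run part plus bonus part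
theorem pvIncScore_split (t : List Char) : ∀ (l : List Int) (score c prev : Int),
    pvIncScore t l score c prev = score + pvH c prev l + pvBonus t l := by
  intro l
  induction l with
  | nil => intro score c prev; simp [pvIncScore, pvH, pvBonus]
  | cons pos rest ih =>
      intro score c prev
      simp only [pvIncScore, pvH, pvBonus]
      rw [ih]
      split_ifs <;> ring

-- total score of a chain of k consecutive positions entered with multiplier c
def pvT : Nat → Int → Int
  | 0, _ => 0
  | k + 1, c => 5 * (c + 1) + 1 + pvT k (c + 1)

-- with multiplier 0 the head always starts a fresh run
theorem pvH_head (a pos : Int) (rest : List Int) :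
    pvH 0 a (pos :: rest) = 6 + pvH 1 pos rest := by
  simp only [pvH]
  split_ifs <;> norm_num

-- a run decomposes as its chain total plus a fresh start on the remainder
theorem pvH_chain : ∀ (rest : List Int) (c pos : Int),
    pvH c pos rest = pvT (pvRunLen pos rest) c + pvH 0 0 (rest.drop (pvRunLen pos rest)) := by
  intro rest
  induction rest with
  | nil => intro c pos; simp [pvH, pvRunLen, pvT]
  | cons q rest' ih =>
      intro c pos
      by_cases hq : q = pos + 1
      · have hrl : pvRunLen pos (q :: rest') = pvRunLen q rest' + 1 := by
          simp [pvRunLen, hq]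
        rw [hrl]
        simp only [pvH, if_pos hq, pvT, List.drop_succ_cons]
        rw [ih (c + 1) q]
        ring
      · have hrl : pvRunLen pos (q :: rest') = 0 := by simp [pvRunLen, hq]
        rw [hrl]
        simp only [pvH, if_neg hq, pvT, List.drop_zero]
        split_ifs <;> norm_num

-- shifting the entry multiplier of a chain
theorem pvT_shift : ∀ (k : Nat) (c : Int), pvT k c = pvT k 1 + 5 * (k : Int) * (c - 1) := by
  intro k
  induction k with
  | zero => intro c; simp [pvT]
  | succ k ih =>
      intro c
      simp only [pvT]
      rw [ih (c + 1), ih (1 + 1)]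
      push_cast
      ring

-- a chain entered with multiplier 1 equals B's closed-form run score
theorem pvT_run : ∀ (k : Nat), 6 + pvT k 1
    = PySem.Int.floordiv (5 * ((k : Int) + 1) * (((k : Int) + 1) + 1)) 2 + ((k : Int) + 1) := by
  intro k
  induction k with
  | zero => decide
  | succ k ih =>
      have hdiv : PySem.Int.floordiv (5 * ((k : Int) + 1 + 1) * ((k : Int) + 1 + 1 + 1)) 2
          = PySem.Int.floordiv (5 * ((k : Int) + 1) * (((k : Int) + 1) + 1)) 2 + 5 * ((k : Int) + 2) := by
        rw [PySem.Int.floordiv_eq_ediv_of_pos (by norm_num),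
          PySem.Int.floordiv_eq_ediv_of_pos (by norm_num)]
        rw [show 5 * ((k : Int) + 1 + 1) * ((k : Int) + 1 + 1 + 1)
            = 5 * ((k : Int) + 1) * (((k : Int) + 1) + 1) + (5 * ((k : Int) + 2)) * 2 by ring]
        rw [Int.add_mul_ediv_right _ _ (by norm_num : (2 : Int) ≠ 0)]
      simp only [pvT]
      rw [pvT_shift k (1 + 1)]
      push_cast
      rw [hdiv]
      have ih' := ih
      push_cast at ih'
      omega

-- the incremental run part computes B's run-by-run closed-form score
theorem pvRunScore_eq : ∀ (n : Nat) (l : List Int) (a : Int), l.length ≤ n →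
    pvH 0 a l = pvRunScore l := by
  intro n
  induction n with
  | zero =>
      intro l a hl
      have : l = [] := List.length_eq_zero_iff.mp (by omega)
      subst this; simp [pvH, pvRunScore]
  | succ n ih =>
      intro l a hl
      cases l with
      | nil => simp [pvH, pvRunScore]
      | cons pos rest =>
          rw [pvH_head, pvH_chain]
          have hlen : (rest.drop (pvRunLen pos rest)).length ≤ n := by
            simp only [List.length_drop]
            simp at hl
            omega
          rw [ih (rest.drop (pvRunLen pos rest)) 0 hlen]
          simp only [pvRunScore]
          have := pvT_run (pvRunLen pos rest)
          omega

-- ===== VERDICT (by name: the statement is the Claim_ definition above) =====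
theorem fuzzy_score_positions_spec : Claim_equal_fuzzy_score_positions := by
  intro pattern text _
  unfold Spec_fuzzy_score_positions
  by_cases h1 : pattern.toList = []
  · simp [fuzzy_score_positions, fuzzy_score_positions_alt, h1]
  · by_cases h2 : PySem.Chars.lower text.toList = PySem.Chars.lower pattern.toList
    · simp [fuzzy_score_positions, fuzzy_score_positions_alt, h1, h2]
    · simp only [fuzzy_score_positions, fuzzy_score_positions_alt, h1, h2, if_false]
      set p := PySem.Chars.lower pattern.toList with hp
      set t := PySem.Chars.lower text.toList with ht
      rw [pvAGo_eq _ _ _ 0 0 0 0 (-1) [] (by omega)]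
      have hbm : pvBMatch t p 0 [] = (gm p t 0).map (fun xs => [] ++ xs) := by
        have := pvBMatch_gm t t 0 p [] (by omega) (by simp)
        simpa using this
      cases hgm : gm p t 0 with
      | none =>
          have hlt := (pvCollect_gm p t 0 0 [] (by omega)).2 (by simpa using hgm)
          rw [if_pos hlt, hbm, hgm]
          simp
      | some l =>
          have heq := (pvCollect_gm p t 0 0 [] (by omega)).1 l (by simpa using hgm)
          rw [heq]
          simp only [lt_self_iff_false, if_false, hbm, hgm]
          simp only [Option.map_some, List.nil_append]
          rw [pvIncScore_split, pvRunScore_eq l.length l (-1) le_rfl]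
          ring_nf
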